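-- pv_equiv track=rewrite | github.com/rodmhgl/dbu | teams-management/teams-api/builders.py | sanitize_namespace_name
-- ===== SOURCE A (Python) =====
-- def sanitize_namespace_name(team_name: str) -> str:
--     """Convert team name to valid Kubernetes namespace name.
--
--     Duplicated from teams_operator.py so the API can compute namespace names
--     without depending on the operator.
--     """
--     namespace = team_name.lower()
--     namespace = "".join(c if c.isalnum() else "-" for c in namespace)
--     namespace = "-".join(filter(None, namespace.split("-")))
--     namespace = namespace.strip("-")
--
--     prefix = "team-"
--     max_base = 63 - len(prefix)
--     if len(namespace) > max_base:
--         namespace = namespace[:max_base].rstrip("-")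
--
--     return f"{prefix}{namespace}"
-- ===== SOURCE B (Python) =====
-- def sanitize_namespace_name(team_name: str) -> str:
--     """Single-pass state-machine sanitizer: collapse non-alnum runs to one '-'
--     while building the body, instead of the join/split/filter/strip pipeline."""
--     out = []
--     for c in team_name.lower():
--         if c.isalnum():
--             out.append(c)
--         elif out and out[-1] != "-":
--             out.append("-")
--     while out and out[-1] == "-":
--         out.pop()
--     max_base = 63 - len("team-")
--     if len(out) > max_base:
--         del out[max_base:]
--         while out and out[-1] == "-":
--             out.pop()
--     return "team-" + "".join(out)
-- ===== Notes on version B (the rewrite author's own statement) =====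
-- stated objective: simpler
-- what changed: Replaced A's three-stage pipeline (map each non-alnum char to '-', split on '-', filter out empty pieces, re-join with '-', strip '-') by a single state-machine pass that appends alnum chars and emits at most one separating '-' at a time, followed by the same truncation step.
import Mathlib
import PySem

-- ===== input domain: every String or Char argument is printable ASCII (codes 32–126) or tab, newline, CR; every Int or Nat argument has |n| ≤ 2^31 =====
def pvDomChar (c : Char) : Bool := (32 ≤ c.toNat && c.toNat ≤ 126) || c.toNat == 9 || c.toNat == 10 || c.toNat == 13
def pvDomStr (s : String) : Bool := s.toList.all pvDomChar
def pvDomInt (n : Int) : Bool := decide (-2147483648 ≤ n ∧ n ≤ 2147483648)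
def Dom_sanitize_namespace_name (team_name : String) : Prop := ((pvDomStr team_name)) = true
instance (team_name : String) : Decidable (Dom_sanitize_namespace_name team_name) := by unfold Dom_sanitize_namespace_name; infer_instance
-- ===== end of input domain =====

-- B replaces A's three-stage join/split/strip pipeline by a single state-machine pass (simpler decomposition, same cost).

-- ===== PORT A =====
-- hand port of str.rstrip("-") (PySem has no chars-level rstrip with an argument): drop trailing '-'; exact
def pvRstripDash (cs : List Char) : List Char :=
  (cs.reverse.dropWhile (fun c => c == '-')).reverse

def sanitize_namespace_name (team_name : String) : String :=
  let ns0 := PySem.Chars.lower team_name.toList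
  let ns1 := ns0.map (fun c => if PySem.Chars.isalnum c then c else '-')
  let ns2 := PySem.Chars.join ['-'] ((PySem.Chars.splitOn ns1 ['-']).filter (fun p => !p.isEmpty))
  let ns3 := PySem.Chars.stripChars ns2 ['-']
  let pfx := "team-"
  let max_base : Int := 63 - PySem.Str.len pfx
  let ns4 := if (ns3.length : Int) > max_base
             then pvRstripDash (PySem.Chars.slice ns3 none (some max_base))
             else ns3
  String.ofList (pfx.toList ++ ns4)

-- ===== PORT B =====
-- 'while out and out[-1] == "-": out.pop()' : drop trailing dashes; exact
def pvPopTrailingDashes (out : List Char) : List Char :=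
  (out.reverse.dropWhile (fun c => c == '-')).reverse

def pvBStep (out : List Char) (c : Char) : List Char :=
  if PySem.Chars.isalnum c then out ++ [c]
  else if out ≠ [] ∧ out.getLast? ≠ some '-' then out ++ ['-']
  else out

def sanitize_namespace_name_alt (team_name : String) : String :=
  let out := (PySem.Chars.lower team_name.toList).foldl pvBStep []
  let out := pvPopTrailingDashes out
  let max_base : Int := 63 - PySem.Str.len "team-"
  let out := if (out.length : Int) > max_base
             then pvPopTrailingDashes (out.take max_base.toNat)
             else out
  String.ofList ("team-".toList ++ out)

-- ===== PRECONDITION & SPEC =====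
def Spec_sanitize_namespace_name (team_name : String) (out : String) : Prop := out = sanitize_namespace_name_alt team_name
instance (team_name : String) (out : String) : Decidable (Spec_sanitize_namespace_name team_name out) := by unfold Spec_sanitize_namespace_name; infer_instance

-- ===== CLAIM (what is proved, stated in full; the proofs are below) =====
def Claim_equal_sanitize_namespace_name : Prop := ∀ (team_name : String), Dom_sanitize_namespace_name team_name → Spec_sanitize_namespace_name team_name (sanitize_namespace_name team_name)

-- ===== LEMMAS AND PROOFS =====

-- simple left-to-right splitter: pvSp l = l split on '-' (all pieces, empties kept)
def pvSp : List Char → List (List Char)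
  | [] => [[]]
  | c :: r => if c = '-' then [] :: pvSp r else (pvSp r).modifyHead (c :: ·)

-- the state machine's raw output as a recursive spec; state: none = out empty,
-- some false = out ends in a non-dash, some true = out ends in '-'
def pvD : Option Bool → List Char → List Char
  | _, [] => []
  | st, c :: r =>
    if PySem.Chars.isalnum c then c :: pvD (some false) r
    else match st with
      | none => pvD none r
      | some false => '-' :: pvD (some true) r
      | some true => pvD (some true) r

def pvF (c : Char) : Char := if PySem.Chars.isalnum c then c else '-'

def pvA' (l : List Char) : List Char :=
  List.intercalate ['-'] ((pvSp (l.map pvF)).filter (fun p => !p.isEmpty))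

def pvW (l : List Char) : List Char :=
  match pvSp (l.map pvF) with
  | [] => []
  | h :: t => h ++ (if (t.filter (fun p => !p.isEmpty)) = [] then []
                    else '-' :: List.intercalate ['-'] (t.filter (fun p => !p.isEmpty)))

theorem pvInter_cons₂ (a b : List Char) (l : List (List Char)) :
    List.intercalate ['-'] (a :: b :: l) = a ++ '-' :: List.intercalate ['-'] (b :: l) := by
  simp [List.intercalate, List.intersperse]

theorem pvInter_singleton (a : List Char) : List.intercalate ['-'] [a] = a := by
  simp [List.intercalate]

theorem pvSp_ne_nil (l : List Char) : pvSp l ≠ [] := by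
  induction l with
  | nil => simp [pvSp]
  | cons c r ih =>
    simp only [pvSp]
    split
    · simp
    · cases h : pvSp r with
      | nil => exact absurd h ih
      | cons a b => simp [List.modifyHead]

-- splitOn.go with enough fuel computes pvSp
theorem pvGo_eq (fuel : Nat) : ∀ (l cur : List Char) (acc : List (List Char)),
    l.length < fuel →
    PySem.Chars.splitOn.go ['-'] fuel l cur acc
      = acc.reverse ++ (pvSp l).modifyHead (cur.reverse ++ ·) := by
  induction fuel with
  | zero => intro l cur acc h; omega
  | succ f ih =>
    intro l cur acc h
    cases l with
    | nil => simp [PySem.Chars.splitOn.go, pvSp, List.modifyHead]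
    | cons c rest =>
      simp only [PySem.Chars.splitOn.go]
      by_cases hc : c = '-'
      · subst hc
        have hpre : List.isPrefixOf ['-'] ('-' :: rest) = true := by
          simp [List.isPrefixOf]
        simp only [hpre, if_pos, List.length_cons, List.length_nil, List.drop_succ_cons,
          List.drop_zero]
        rw [ih rest [] ((List.reverse cur) :: acc) (by simpa using Nat.lt_of_succ_lt_succ h)]
        simp only [pvSp, if_true]
        cases hsp : pvSp rest with
        | nil => exact absurd hsp (pvSp_ne_nil rest)
        | cons a b => simp [List.modifyHead]
      · have hpre : List.isPrefixOf ['-'] (c :: rest) = false := by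
          simp [List.isPrefixOf]; intro hh; exact absurd hh.symm hc
        simp only [hpre, Bool.false_eq_true, if_false]
        rw [ih rest (c :: cur) acc (by simpa using Nat.lt_of_succ_lt_succ h)]
        simp only [pvSp, hc, if_false]
        cases hsp : pvSp rest with
        | nil => exact absurd hsp (pvSp_ne_nil rest)
        | cons a b => simp [List.modifyHead]

theorem pvSplitOn_eq (l : List Char) : PySem.Chars.splitOn l ['-'] = pvSp l := by
  unfold PySem.Chars.splitOn
  rw [pvGo_eq (l.length + 1) l [] [] (by omega)]
  cases hsp : pvSp l with
  | nil => exact absurd hsp (pvSp_ne_nil l)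
  | cons a b => simp [List.modifyHead]

-- every chunk of pvSp is dash-free
theorem pvSp_nodash (l : List Char) : ∀ g ∈ pvSp l, '-' ∉ g := by
  induction l with
  | nil => simp [pvSp]
  | cons c r ih =>
    simp only [pvSp]
    by_cases hc : c = '-'
    · simp only [hc, if_true]
      intro g hg
      rcases List.mem_cons.mp hg with h | h
      · simp [h]
      · exact ih g h
    · simp only [hc, if_false]
      cases hsp : pvSp r with
      | nil => exact absurd hsp (pvSp_ne_nil r)
      | cons a b =>
        intro g hg
        rcases List.mem_cons.mp hg with h | h
        · subst h
          intro hm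
          rcases List.mem_cons.mp hm with h | h
          · exact hc h.symm
          · exact ih a (by rw [hsp]; exact List.mem_cons_self) h
        · exact ih g (by rw [hsp]; exact List.mem_cons.mpr (Or.inr h))

-- rstrip of a cons
theorem pvRstrip_cons (c : Char) (x : List Char) :
    pvRstripDash (c :: x) =
      if pvRstripDash x = [] then (if c = '-' then [] else [c])
      else c :: pvRstripDash x := by
  unfold pvRstripDash
  simp only [List.reverse_cons, List.dropWhile_append]
  by_cases hc : c = '-'
  · subst hc
    by_cases h : (x.reverse.dropWhile (fun c => c == '-')) = [] <;> simp [h, List.dropWhile]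
  · have hcb : (c == '-') = false := beq_eq_false_iff_ne.mpr hc
    by_cases h : (x.reverse.dropWhile (fun c => c == '-')) = [] <;>
      simp [h, hc, List.dropWhile, hcb]

-- intercalate of nonempty chunks is nonempty
theorem pvInter_ne_nil (gs : List (List Char)) (hne : gs ≠ [])
    (h : ∀ g ∈ gs, g ≠ []) : List.intercalate ['-'] gs ≠ [] := by
  cases gs with
  | nil => exact absurd rfl hne
  | cons a b =>
    have ha : a ≠ [] := h a List.mem_cons_self
    cases b with
    | nil => simpa [List.intercalate] using ha
    | cons a' b' =>
      rw [pvInter_cons₂]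
      intro hh
      rcases List.append_eq_nil_iff.mp hh with ⟨h1, _⟩
      exact ha h1

-- the three-way simultaneous characterization
theorem pvMain (l : List Char) :
    pvRstripDash (pvD none l) = pvA' l
    ∧ pvRstripDash (pvD (some false) l) = pvW l
    ∧ pvRstripDash (pvD (some true) l) = pvA' l := by
  induction l with
  | nil => exact ⟨by decide, by decide, by decide⟩
  | cons c r ih =>
    obtain ⟨ihE, ihN, ihD⟩ := ih
    by_cases hc : PySem.Chars.isalnum c
    · -- alnum: pvF c = c, c ≠ '-'
      have hfc : pvF c = c := by simp [pvF, hc]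
      have hcd : ¬ (c = '-') := by
        intro h; rw [h] at hc; exact absurd hc (by decide)
      have hsp : pvSp ((c :: r).map pvF) = (pvSp (r.map pvF)).modifyHead (c :: ·) := by
        simp [pvSp, hfc, hcd]
      obtain ⟨a, b, hab⟩ : ∃ a b, pvSp (r.map pvF) = a :: b := by
        cases h : pvSp (r.map pvF) with
        | nil => exact absurd h (pvSp_ne_nil _)
        | cons a b => exact ⟨a, b, rfl⟩
      have hWr : pvW r = a ++ (if (b.filter (fun p => !p.isEmpty)) = [] then []
          else '-' :: List.intercalate ['-'] (b.filter (fun p => !p.isEmpty))) := by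
        simp [pvW, hab]
      have hAcr : pvA' (c :: r) = c :: pvW r := by
        simp only [pvA', hsp, hab, List.modifyHead]
        rw [hWr]
        by_cases hb : (b.filter (fun p => !p.isEmpty)) = []
        · simp [hb, List.intercalate]
        · cases hbb : b.filter (fun p => !p.isEmpty) with
          | nil => exact absurd hbb hb
          | cons g gs =>
            have hfc2 : List.filter (fun p => !p.isEmpty) ((c :: a) :: b)
                = (c :: a) :: List.filter (fun p => !p.isEmpty) b := by simp
            rw [hfc2, hbb, pvInter_cons₂]
            simp
      have hDstep : ∀ st, pvD st (c :: r) = c :: pvD (some false) r := by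
        intro st; cases st with
        | none => simp [pvD, hc]
        | some bb => cases bb <;> simp [pvD, hc]
      have hkey : pvRstripDash (c :: pvD (some false) r) = c :: pvW r := by
        rw [pvRstrip_cons]
        by_cases h0 : pvRstripDash (pvD (some false) r) = []
        · have hW0 : pvW r = [] := by rw [← ihN]; exact h0
          simp [h0, hcd, hW0]
        · rw [if_neg h0, ihN]
      have hWcr : pvW (c :: r) = c :: pvW r := by
        simp only [pvW, hsp, hab, List.modifyHead, List.cons_append]
      exact ⟨by rw [hDstep none, hkey, hAcr], by rw [hDstep (some false), hkey, hWcr],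
        by rw [hDstep (some true), hkey, hAcr]⟩
    · -- non-alnum: pvF c = '-'
      have hfc : pvF c = '-' := by simp [pvF, hc]
      have hsp : pvSp ((c :: r).map pvF) = [] :: pvSp (r.map pvF) := by
        rw [List.map_cons, hfc]
        simp [pvSp]
      have hfilter : List.filter (fun p => !p.isEmpty) ([] :: pvSp (r.map pvF))
          = List.filter (fun p => !p.isEmpty) (pvSp (r.map pvF)) := by
        simp
      have hAcr : pvA' (c :: r) = pvA' r := by
        simp only [pvA', hsp, hfilter]
      refine ⟨?_, ?_, ?_⟩
      · simp only [pvD, hc, Bool.false_eq_true, if_false]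
        rw [ihE, hAcr]
      · -- N-state: emit '-' and go to D-state
        simp only [pvD, hc, Bool.false_eq_true, if_false]
        rw [pvRstrip_cons]
        have hWcr : pvW (c :: r) =
            (if ((pvSp (r.map pvF)).filter (fun p => !p.isEmpty)) = [] then []
             else '-' :: List.intercalate ['-'] ((pvSp (r.map pvF)).filter (fun p => !p.isEmpty))) := by
          simp only [pvW, hsp, List.nil_append]
        by_cases h0 : pvRstripDash (pvD (some true) r) = []
        · have hA0 : pvA' r = [] := by rw [← ihD]; exact h0
          have hf0 : ((pvSp (r.map pvF)).filter (fun p => !p.isEmpty)) = [] := by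
            by_contra hne
            exact pvInter_ne_nil _ hne (by
              intro g hg
              have := List.of_mem_filter hg
              simpa using this) hA0
          simp [h0, hWcr, hf0]
        · have hfne : ((pvSp (r.map pvF)).filter (fun p => !p.isEmpty)) ≠ [] := by
            intro hf0
            apply h0
            rw [ihD]
            simp [pvA', hf0, List.intercalate]
          rw [if_neg h0, ihD, hWcr, if_neg hfne]
          rfl
      · simp only [pvD, hc, Bool.false_eq_true, if_false]
        rw [ihD, hAcr]

-- B's fold equals the state-machine spec (nonempty accumulator, by last char)
theorem pvFold_state (l : List Char) :
    (∀ out, out ≠ [] → out.getLast? = some '-' →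
        l.foldl pvBStep out = out ++ pvD (some true) l)
    ∧ (∀ out, out ≠ [] → out.getLast? ≠ some '-' →
        l.foldl pvBStep out = out ++ pvD (some false) l) := by
  induction l with
  | nil => simp [pvD]
  | cons c r ih =>
    obtain ⟨ihD, ihN⟩ := ih
    constructor
    · intro out hne hlast
      simp only [List.foldl_cons]
      by_cases hc : PySem.Chars.isalnum c
      · have hstep : pvBStep out c = out ++ [c] := by simp [pvBStep, hc]
        rw [hstep, ihN (out ++ [c]) (by simp) (by
          simp only [List.getLast?_append, List.getLast?_singleton]
          intro h
          have : c = '-' := by simpa using h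
          rw [this] at hc; exact absurd hc (by decide))]
        simp [pvD, hc]
      · have hstep : pvBStep out c = out := by
          simp [pvBStep, hc, hne, hlast]
        rw [hstep, ihD out hne hlast]
        simp [pvD, hc]
    · intro out hne hlast
      simp only [List.foldl_cons]
      by_cases hc : PySem.Chars.isalnum c
      · have hstep : pvBStep out c = out ++ [c] := by simp [pvBStep, hc]
        rw [hstep, ihN (out ++ [c]) (by simp) (by
          simp only [List.getLast?_append, List.getLast?_singleton]
          intro h
          have : c = '-' := by simpa using h
          rw [this] at hc; exact absurd hc (by decide))]
        simp [pvD, hc]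
      · have hstep : pvBStep out c = out ++ ['-'] := by
          simp [pvBStep, hc, hne, hlast]
        rw [hstep, ihD (out ++ ['-']) (by simp) (by
          simp [List.getLast?_append])]
        simp [pvD, hc]

theorem pvFold_empty (l : List Char) : l.foldl pvBStep [] = pvD none l := by
  induction l with
  | nil => simp [pvD]
  | cons c r ih =>
    simp only [List.foldl_cons]
    by_cases hc : PySem.Chars.isalnum c
    · have hstep : pvBStep [] c = [c] := by simp [pvBStep, hc]
      rw [hstep, (pvFold_state r).2 [c] (by simp) (by
        simp only [List.getLast?_singleton]
        intro h
        have : c = '-' := by simpa using h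
        rw [this] at hc; exact absurd hc (by decide))]
      simp [pvD, hc]
    · have hstep : pvBStep [] c = [] := by simp [pvBStep, hc]
      rw [hstep, ih]
      simp [pvD, hc]

-- head and last of an intercalation of nonempty dash-free chunks are not '-'
theorem pvInter_head (gs : List (List Char)) (hne : ∀ g ∈ gs, g ≠ [])
    (hnd : ∀ g ∈ gs, '-' ∉ g) :
    ∀ c, (List.intercalate ['-'] gs).head? = some c → ¬ (c = '-') := by
  cases gs with
  | nil => simp [List.intercalate]
  | cons a b =>
    obtain ⟨x, xs, hx⟩ : ∃ x xs, a = x :: xs := by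
      cases h : a with
      | nil => exact absurd h (hne a List.mem_cons_self)
      | cons x xs => exact ⟨x, xs, rfl⟩
    have hxa : x ∈ a := by rw [hx]; exact List.mem_cons_self
    have hxnd : ¬ (x = '-') := fun h => hnd a List.mem_cons_self (h ▸ hxa)
    cases b with
    | nil =>
      simp only [pvInter_singleton, hx, List.head?_cons]
      intro c hcc
      cases hcc; exact hxnd
    | cons a' b' =>
      rw [pvInter_cons₂, hx]
      simp only [List.cons_append, List.head?_cons]
      intro c hcc
      cases hcc; exact hxnd

theorem pvInter_last (gs : List (List Char)) (hne : ∀ g ∈ gs, g ≠ [])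
    (hnd : ∀ g ∈ gs, '-' ∉ g) :
    ∀ c, (List.intercalate ['-'] gs).getLast? = some c → ¬ (c = '-') := by
  induction gs with
  | nil => simp [List.intercalate]
  | cons a b ih =>
    cases b with
    | nil =>
      simp only [pvInter_singleton]
      intro c hcc hc
      exact hnd a List.mem_cons_self (hc ▸ List.mem_of_getLast? hcc)
    | cons a' b' =>
      rw [pvInter_cons₂]
      intro c hcc
      have hbne : List.intercalate ['-'] (a' :: b') ≠ [] := by
        refine pvInter_ne_nil _ (by simp) (fun g hg => hne g (List.mem_cons.mpr (Or.inr hg)))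
      obtain ⟨d, hd⟩ := List.getLast?_isSome.mpr hbne |> Option.isSome_iff_exists.mp
      rw [show ('-' :: List.intercalate ['-'] (a' :: b')) = ['-'] ++ List.intercalate ['-'] (a' :: b') from rfl] at hcc
      rw [List.getLast?_append, List.getLast?_append, hd] at hcc
      have hdc : d = c := by simpa using hcc
      exact hdc ▸ ih (fun g hg => hne g (List.mem_cons.mpr (Or.inr hg)))
        (fun g hg => hnd g (List.mem_cons.mpr (Or.inr hg))) d hd

-- stripping dashes from an intercalation of nonempty dash-free chunks is the identity
theorem pvStrip_id (gs : List (List Char)) (hne : ∀ g ∈ gs, g ≠ [])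
    (hnd : ∀ g ∈ gs, '-' ∉ g) :
    PySem.Chars.stripChars (List.intercalate ['-'] gs) ['-']
      = List.intercalate ['-'] gs := by
  show (List.dropWhile (fun c => List.contains ['-'] c)
      ((List.dropWhile (fun c => List.contains ['-'] c) (List.intercalate ['-'] gs)).reverse)).reverse
      = List.intercalate ['-'] gs
  cases hsc : List.intercalate ['-'] gs with
  | nil => simp
  | cons x xs =>
    have hx : ¬ (x = '-') := pvInter_head gs hne hnd x (by rw [hsc]; rfl)
    have h1 : List.dropWhile (fun c => List.contains ['-'] c) (x :: xs) = x :: xs :=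
      List.dropWhile_cons_of_neg (by simpa using hx)
    rw [h1]
    obtain ⟨y, hy⟩ : ∃ y, (x :: xs).getLast? = some y :=
      ⟨(x :: xs).getLast (by simp), List.getLast?_eq_some_getLast _⟩
    have hynd : ¬ (y = '-') := pvInter_last gs hne hnd y (by rw [hsc]; exact hy)
    have hrev : (x :: xs).reverse.head? = some y := by rw [List.head?_reverse]; exact hy
    cases hrc : (x :: xs).reverse with
    | nil => simp at hrc
    | cons z zs =>
      rw [hrc] at hrev
      have hz : z = y := by cases hrev; rfl
      have hdz : List.dropWhile (fun c => List.contains ['-'] c) (z :: zs) = z :: zs := by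
        apply List.dropWhile_cons_of_neg
        simpa [hz] using hynd
      rw [hdz, ← hrc, List.reverse_reverse]

-- the fully-assembled core equality: A's ns3 equals B's popped fold
theorem pvNs3_eq (l : List Char) :
    PySem.Chars.stripChars
      (PySem.Chars.join ['-']
        ((PySem.Chars.splitOn (l.map (fun c => if PySem.Chars.isalnum c then c else '-')) ['-']).filter
          (fun p => !p.isEmpty))) ['-']
    = pvPopTrailingDashes (l.foldl pvBStep []) := by
  have hmap : l.map (fun c => if PySem.Chars.isalnum c then c else '-') = l.map pvF := by
    simp [pvF]
  rw [hmap, pvSplitOn_eq]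
  have hne : ∀ g ∈ (pvSp (l.map pvF)).filter (fun p => !p.isEmpty), g ≠ [] := by
    intro g hg
    have := List.of_mem_filter hg
    simpa using this
  have hnd : ∀ g ∈ (pvSp (l.map pvF)).filter (fun p => !p.isEmpty), '-' ∉ g := by
    intro g hg
    exact pvSp_nodash _ g (List.mem_of_mem_filter hg)
  show PySem.Chars.stripChars (List.intercalate ['-'] _) ['-'] = _
  rw [pvStrip_id _ hne hnd, pvFold_empty]
  exact ((pvMain l).1).symm

-- ===== VERDICT (by name: the statement is the Claim_ definition above) =====
theorem sanitize_namespace_name_spec : Claim_equal_sanitize_namespace_name := by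
  intro team_name _
  show _ = _
  unfold sanitize_namespace_name sanitize_namespace_name_alt
  simp only []
  rw [pvNs3_eq]
  have h58 : (63 : Int) - PySem.Str.len "team-" = 58 := by decide
  rw [h58]
  set x := pvPopTrailingDashes ((PySem.Chars.lower team_name.toList).foldl pvBStep []) with hx
  have hslice : PySem.Chars.slice x none (some 58) = x.take (58 : Int).toNat := by
    have := PySem.List.slice_to x (b := 58) (by norm_num)
    simpa [PySem.Chars.slice_eq_listSlice] using this
  rw [hslice]
  rfl
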